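-- pv_equiv track=rewrite | github.com/AdimadLp/Wumpus | helpers/neighborhood.py | neumann_neighborhood
-- ===== SOURCE A (Python) =====
-- def neumann_neighborhood(x, y, size, multiplier=1):
--     """
--     Calculate the Neumann neighborhood for a given position.
--
--     Parameters:
--     -----------
--     x : int
--         The x-coordinate of the position.
--     y : int
--         The y-coordinate of the position.
--     size : int
--         The size of the grid.
--     multiplier : int
--         The range multiplier for the neighborhood.
--
--     Returns:
--     --------
--     list
--         A list of (x, y) tuples representing the neighboring positions.
--     """
--     neighbors = []
--     for dx in range(-multiplier, multiplier + 1):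
--         for dy in range(-multiplier, multiplier + 1):
--             if (dx == 0 and dy == 0) or (dx != 0 and dy != 0):
--                 continue
--             new_x = x + dx
--             new_y = y + dy
--             if 0 <= new_x < size and 0 <= new_y < size:
--                 neighbors.append((new_x, new_y))
--     return neighbors
-- ===== SOURCE B (Python) =====
-- def neumann_neighborhood(x, y, size, multiplier=1):
--     """Cross-shaped (axis-aligned) neighborhood within the grid, one pass over
--     axis offsets instead of scanning the full (2m+1)^2 square."""
--     candidates = (
--         [(x + d, y) for d in range(-multiplier, 0)]
--         + [(x, y + d) for d in range(-multiplier, 0)]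
--         + [(x, y + d) for d in range(1, multiplier + 1)]
--         + [(x + d, y) for d in range(1, multiplier + 1)]
--     )
--     return [(a, b) for (a, b) in candidates if 0 <= a < size and 0 <= b < size]
-- ===== Notes on version B (the rewrite author's own statement) =====
-- stated objective: faster
-- what changed: Instead of scanning the full (2m+1)x(2m+1) square and skipping diagonal/zero offsets, B enumerates only the 4m axis offsets directly (left horizontals, vertical column, right horizontals, in A's emission order) and filters by grid bounds.
import Mathlib
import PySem

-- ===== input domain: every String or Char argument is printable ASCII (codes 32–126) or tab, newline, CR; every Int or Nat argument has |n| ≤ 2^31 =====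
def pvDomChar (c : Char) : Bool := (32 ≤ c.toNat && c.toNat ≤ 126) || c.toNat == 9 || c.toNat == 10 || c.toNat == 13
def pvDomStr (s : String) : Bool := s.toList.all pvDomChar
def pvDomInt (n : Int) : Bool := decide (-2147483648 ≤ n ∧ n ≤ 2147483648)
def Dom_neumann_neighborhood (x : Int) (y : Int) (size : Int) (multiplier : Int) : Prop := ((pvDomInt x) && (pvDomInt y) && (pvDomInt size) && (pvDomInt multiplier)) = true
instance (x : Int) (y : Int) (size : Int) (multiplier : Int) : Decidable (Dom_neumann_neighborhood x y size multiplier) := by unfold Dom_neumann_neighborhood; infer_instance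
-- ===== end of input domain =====

-- B enumerates only the 4*multiplier axis offsets (in A's emission order) instead of the full square: O(multiplier) vs O(multiplier^2).


-- ===== PORT A =====
def neumann_neighborhood (x : Int) (y : Int) (size : Int) (multiplier : Int) : List (Int × Int) :=
  (PySem.List.pyRange (-multiplier) (multiplier + 1) 1).foldl (fun neighbors dx =>
    (PySem.List.pyRange (-multiplier) (multiplier + 1) 1).foldl (fun neighbors dy =>
      if (dx == 0 && dy == 0) || (dx != 0 && dy != 0) then neighbors
      else
        let new_x := x + dx
        let new_y := y + dy
        if 0 ≤ new_x ∧ new_x < size ∧ 0 ≤ new_y ∧ new_y < size then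
          neighbors ++ [(new_x, new_y)]
        else neighbors) neighbors) []

-- ===== PORT B =====
def neumann_neighborhood_alt (x : Int) (y : Int) (size : Int) (multiplier : Int) : List (Int × Int) :=
  let candidates :=
    (PySem.List.pyRange (-multiplier) 0 1).map (fun d => (x + d, y))
    ++ (PySem.List.pyRange (-multiplier) 0 1).map (fun d => (x, y + d))
    ++ (PySem.List.pyRange 1 (multiplier + 1) 1).map (fun d => (x, y + d))
    ++ (PySem.List.pyRange 1 (multiplier + 1) 1).map (fun d => (x + d, y))
  candidates.filter (fun p => decide (0 ≤ p.1 ∧ p.1 < size ∧ 0 ≤ p.2 ∧ p.2 < size))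

-- ===== PRECONDITION & SPEC =====
def Spec_neumann_neighborhood (x : Int) (y : Int) (size : Int) (multiplier : Int) (out : List (Int × Int)) : Prop := out = neumann_neighborhood_alt x y size multiplier
instance (x : Int) (y : Int) (size : Int) (multiplier : Int) (out : List (Int × Int)) : Decidable (Spec_neumann_neighborhood x y size multiplier out) := by unfold Spec_neumann_neighborhood; infer_instance

-- ===== CLAIM (what is proved, stated in full; the proofs are below) =====
def Claim_equal_neumann_neighborhood : Prop := ∀ (x : Int) (y : Int) (size : Int) (multiplier : Int), Dom_neumann_neighborhood x y size multiplier → Spec_neumann_neighborhood x y size multiplier (neumann_neighborhood x y size multiplier)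

-- ===== LEMMAS AND PROOFS =====
-- the in-bounds test both programs apply
def pvInb (size : Int) (p : Int × Int) : Bool :=
  decide (0 ≤ p.1 ∧ p.1 < size ∧ 0 ≤ p.2 ∧ p.2 < size)

-- A's inner dy-loop, for a fixed dx, is a filtered map over the dy-range
lemma pv_inner (x y size dx : Int) (R : List Int) (acc : List (Int × Int)) :
    R.foldl (fun neighbors dy =>
      if (dx == 0 && dy == 0) || (dx != 0 && dy != 0) then neighbors
      else
        let new_x := x + dx
        let new_y := y + dy
        if 0 ≤ new_x ∧ new_x < size ∧ 0 ≤ new_y ∧ new_y < size then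
          neighbors ++ [(new_x, new_y)]
        else neighbors) acc
    = acc ++ (R.filter (fun dy =>
        !((dx == 0 && dy == 0) || (dx != 0 && dy != 0)) && pvInb size (x + dx, y + dy))).map
          (fun dy => (x + dx, y + dy)) := by
  rw [← PySem.List.foldl_append_if
    (fun dy => !((dx == 0 && dy == 0) || (dx != 0 && dy != 0)) && pvInb size (x + dx, y + dy))
    (fun dy => (x + dx, y + dy)) R acc]
  apply PySem.List.foldl_congr_mem
  intro a dy _
  by_cases hs : ((dx == 0 && dy == 0) || (dx != 0 && dy != 0)) = true <;>
    by_cases hc : (0 ≤ x + dx ∧ x + dx < size ∧ 0 ≤ y + dy ∧ y + dy < size) <;>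
    simp [hs, hc, pvInb]

-- turning an if-singleton flatMap into a filtered map
lemma pv_flatMap_ite {α β : Type} (p : β → Bool) (f : α → β) (l : List α) :
    l.flatMap (fun a => if p (f a) then [f a] else []) = (l.map f).filter p := by
  induction l with
  | nil => rfl
  | cons a t ih =>
    by_cases h : p (f a) = true <;> simp [h, ih]

lemma pv_A_flatMap (x y size m : Int) :
    neumann_neighborhood x y size m
      = (PySem.List.pyRange (-m) (m + 1) 1).flatMap (fun dx =>
          ((PySem.List.pyRange (-m) (m + 1) 1).filter (fun dy =>
            !((dx == 0 && dy == 0) || (dx != 0 && dy != 0)) && pvInb size (x + dx, y + dy))).map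
              (fun dy => (x + dx, y + dy))) := by
  unfold neumann_neighborhood
  have h := PySem.List.foldl_append_eq_flatMap
    (fun dx => ((PySem.List.pyRange (-m) (m + 1) 1).filter (fun dy =>
        !((dx == 0 && dy == 0) || (dx != 0 && dy != 0)) && pvInb size (x + dx, y + dy))).map
          (fun dy => (x + dx, y + dy)))
    (PySem.List.pyRange (-m) (m + 1) 1) []
  rw [List.nil_append] at h
  rw [← h]
  apply PySem.List.foldl_congr_mem
  intro acc dx _
  exact pv_inner x y size dx _ acc


-- ===== VERDICT (by name: the statement is the Claim_ definition above) =====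
theorem neumann_neighborhood_spec : Claim_equal_neumann_neighborhood := by
  intro x y size m _
  unfold Spec_neumann_neighborhood
  rw [pv_A_flatMap]
  unfold neumann_neighborhood_alt
  by_cases hm : m < 0
  · rw [PySem.List.pyRange_one_eq_nil (by omega), PySem.List.pyRange_one_eq_nil (show (0:Int) ≤ -m by omega),
        PySem.List.pyRange_one_eq_nil (show m + 1 ≤ 1 by omega)]
    simp
  · push Not at hm
    rw [PySem.List.pyRange_one_append (-m) 0 (m + 1) (by omega) (by omega),
        PySem.List.pyRange_one_append 0 1 (m + 1) (by omega) (by omega),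
        show PySem.List.pyRange 0 1 = [0] from by decide]
    rw [List.flatMap_append, List.flatMap_append]
    have hmemneg : ∀ d ∈ PySem.List.pyRange (-m) 0 1, d < 0 := by
      intro d hd; have := PySem.List.mem_pyRange_one.mp hd; omega
    have hmempos : ∀ d ∈ PySem.List.pyRange 1 (m + 1) 1, 0 < d := by
      intro d hd; have := PySem.List.mem_pyRange_one.mp hd; omega
    -- horizontal arms: for dx ≠ 0 the dy-filter keeps at most dy = 0
    have harm : ∀ (S : List Int), (∀ dx ∈ S, dx ≠ 0) →
        S.flatMap (fun dx =>
          (((PySem.List.pyRange (-m) 0 1 ++ ([0] ++ PySem.List.pyRange 1 (m + 1) 1)).filter (fun dy =>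
            !((dx == 0 && dy == 0) || (dx != 0 && dy != 0)) && pvInb size (x + dx, y + dy))).map
              (fun dy => (x + dx, y + dy))))
        = (S.map (fun d => (x + d, y))).filter (pvInb size) := by
      intro S hS
      rw [← pv_flatMap_ite (pvInb size) (fun d => (x + d, y)) S]
      apply List.flatMap_congr
      intro dx hdx
      have hdx0 : dx ≠ 0 := hS dx hdx
      have hz : ∀ (T : List Int), (∀ dy ∈ T, dy ≠ 0) →
          T.filter (fun dy =>
            !((dx == 0 && dy == 0) || (dx != 0 && dy != 0)) && pvInb size (x + dx, y + dy)) = [] := by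
        intro T hT
        apply List.filter_eq_nil_iff.mpr
        intro dy hdy
        simp [hT dy hdy, hdx0]
      rw [List.filter_append, List.filter_append,
          hz (PySem.List.pyRange (-m) 0 1) (fun dy hdy => by have := hmemneg dy hdy; omega),
          hz (PySem.List.pyRange 1 (m + 1) 1) (fun dy hdy => by have := hmempos dy hdy; omega)]
      by_cases hc : pvInb size (x + dx, y) = true <;>
        · simp only [List.nil_append, List.append_nil, List.filter_cons, List.filter_nil, hc]
          simp [hdx0, hc]
    rw [harm (PySem.List.pyRange (-m) 0 1) (fun dx h => by have := hmemneg dx h; omega),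
        harm (PySem.List.pyRange 1 (m + 1) 1) (fun dx h => by have := hmempos dx h; omega)]
    simp only [List.flatMap_cons, List.flatMap_nil, List.append_nil, List.filter_append]
    have hvert : ∀ (T : List Int), (∀ dy ∈ T, dy ≠ 0) →
        (T.filter (fun dy =>
          !(((0:Int) == 0 && dy == 0) || ((0:Int) != 0 && dy != 0)) && pvInb size (x + 0, y + dy))).map
            (fun dy => (x + 0, y + dy))
        = (T.map (fun d => (x, y + d))).filter (pvInb size) := by
      intro T hT
      rw [List.filter_map]
      have he : T.filter (fun dy =>
          !(((0:Int) == 0 && dy == 0) || ((0:Int) != 0 && dy != 0)) && pvInb size (x + 0, y + dy))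
          = T.filter ((pvInb size) ∘ (fun d => (x, y + d))) := by
        apply List.filter_congr
        intro dy hdy
        simp [hT dy hdy]
      rw [he]
      simp
    have hmid : List.filter (fun dy =>
        !(((0:Int) == 0 && dy == 0) || ((0:Int) != 0 && dy != 0)) && pvInb size (x + 0, y + dy)) [0] = [] := by
      simp
    rw [hmid, List.nil_append, List.map_append,
        hvert (PySem.List.pyRange (-m) 0 1) (fun dy h => by have := hmemneg dy h; omega),
        hvert (PySem.List.pyRange 1 (m + 1) 1) (fun dy h => by have := hmempos dy h; omega)]
    have hfun : pvInb size = (fun p : Int × Int =>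
        decide (0 ≤ p.1) && (decide (p.1 < size) && (decide (0 ≤ p.2) && decide (p.2 < size)))) := by
      funext p; simp [pvInb]
    rw [hfun]
    simp [List.append_assoc]
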